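-- pv_equiv track=rewrite | github.com/kabirrajsingh/ess2app | Parsing server/dump/ImageParser.py | extract_TravelMode
-- ===== SOURCE A (Python) =====
-- def extract_TravelMode(words_list):
--     flight_terms = {'flight', 'airplane', 'airline', 'airport'}
--     bus_auto_terms = {'bus', 'auto', 'car', 'transport', 'vehicle'}
--
--     words_lower = [word.lower() for word in words_list]
--
--     contains_flight = any(term in words_lower for term in flight_terms)
--
--     # Check for bus/auto-related terms including compound terms
--     contains_bus_auto = any(
--         term in words_lower or any(sub_term in term for sub_term in bus_auto_terms)
--         for term in words_lower
--     )
--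
--     if contains_flight:
--         return 'flight'
--     elif contains_bus_auto:
--         return 'bus/auto'
--     else:
--         return None
-- ===== SOURCE B (Python) =====
-- def extract_TravelMode(words_list):
--     flight_terms = {'flight', 'airplane', 'airline', 'airport'}
--     flight = False
--     any_word = False
--     for word in words_list:
--         any_word = True
--         if word.lower() in flight_terms:
--             flight = True
--     if flight:
--         return 'flight'
--     if any_word:
--         return 'bus/auto'
--     return None
-- ===== Notes on version B (the rewrite author's own statement) =====
-- stated objective: simpler
-- what changed: Replaces A's two separate any()-passes (one of which re-scans the list inside a nested membership test) with a single loop that tracks a flight flag and a non-emptiness flag; the vacuous bus/auto substring machinery is dropped since 'bus/auto' is returned for any non-empty list without a flight term.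
import Mathlib
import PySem

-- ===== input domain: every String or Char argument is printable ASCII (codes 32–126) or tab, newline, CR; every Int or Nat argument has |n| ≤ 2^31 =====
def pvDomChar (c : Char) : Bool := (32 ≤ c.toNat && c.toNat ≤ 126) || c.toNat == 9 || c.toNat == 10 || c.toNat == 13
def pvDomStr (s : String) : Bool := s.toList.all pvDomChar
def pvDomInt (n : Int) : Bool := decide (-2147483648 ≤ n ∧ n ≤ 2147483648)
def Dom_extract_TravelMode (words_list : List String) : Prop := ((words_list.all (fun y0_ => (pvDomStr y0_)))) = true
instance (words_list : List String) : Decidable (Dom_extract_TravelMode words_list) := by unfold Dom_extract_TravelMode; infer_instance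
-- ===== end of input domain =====

-- B fuses A's two any()-passes into one loop keeping a flight flag and a non-emptiness
-- flag (A's bus/auto test is vacuously true on every non-empty list); objective: simpler.

-- ===== PORT A =====
def extract_TravelMode (words_list : List String) : Option String :=
  let flight_terms : List String := ["flight", "airplane", "airline", "airport"]
  let bus_auto_terms : List String := ["bus", "auto", "car", "transport", "vehicle"]
  let words_lower := words_list.map PySem.Str.lower
  let contains_flight := flight_terms.any (fun term => words_lower.contains term)
  let contains_bus_auto := words_lower.any (fun term =>
    words_lower.contains term || bus_auto_terms.any (fun sub => PySem.Str.isIn sub term))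
  if contains_flight then some "flight"
  else if contains_bus_auto then some "bus/auto"
  else none

-- ===== PORT B =====
def extract_TravelMode_alt (words_list : List String) : Option String :=
  let flight_terms : List String := ["flight", "airplane", "airline", "airport"]
  let st := words_list.foldl
    (fun (s : Bool × Bool) word =>
      (true, if flight_terms.contains (PySem.Str.lower word) then true else s.2))
    (false, false)
  if st.2 then some "flight"
  else if st.1 then some "bus/auto"
  else none

-- ===== PRECONDITION & SPEC =====
def Spec_extract_TravelMode (words_list : List String) (out : Option String) : Prop := out = extract_TravelMode_alt words_list
instance (words_list : List String) (out : Option String) : Decidable (Spec_extract_TravelMode words_list out) := by unfold Spec_extract_TravelMode; infer_instance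

-- ===== CLAIM (what is proved, stated in full; the proofs are below) =====
def Claim_equal_extract_TravelMode : Prop := ∀ (words_list : List String), Dom_extract_TravelMode words_list → Spec_extract_TravelMode words_list (extract_TravelMode words_list)

-- ===== LEMMAS AND PROOFS =====

-- B's fold: first component records non-emptiness, second records a flight term seen.
lemma alt_foldl_spec (ws : List String) (a b : Bool) :
    ws.foldl
      (fun (s : Bool × Bool) word =>
        (true, if ["flight", "airplane", "airline", "airport"].contains (PySem.Str.lower word) then true else s.2))
      (a, b)
    = (a || !ws.isEmpty,
       b || ws.any (fun w => ["flight", "airplane", "airline", "airport"].contains (PySem.Str.lower w))) := by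
  induction ws generalizing a b with
  | nil => simp
  | cons h t ih =>
      simp only [List.foldl_cons, List.isEmpty_cons, List.any_cons, ih]
      split
      · rename_i hc; simp at hc ⊢; tauto
      · rename_i hc; simp at hc; simp [hc.1, hc.2.1, hc.2.2.1, hc.2.2.2]

-- A's flight test (terms searched in the lowered list) matches B's (lowered word tested).
lemma flight_flip (ws : List String) :
    (["flight", "airplane", "airline", "airport"] : List String).any
        (fun term => (ws.map PySem.Str.lower).contains term)
      = ws.any (fun w => ["flight", "airplane", "airline", "airport"].contains (PySem.Str.lower w)) := by
  rw [Bool.eq_iff_iff]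
  simp only [List.any_eq_true, List.contains_iff_mem, List.mem_map]
  constructor
  · rintro ⟨t, ht, w, hw, rfl⟩; exact ⟨w, hw, ht⟩
  · rintro ⟨w, hw, ht⟩; exact ⟨_, ht, w, hw, rfl⟩

-- A's bus/auto test is true on every non-empty list: each term is a member of words_lower.
lemma bus_auto_vacuous (ws : List String) :
    (ws.map PySem.Str.lower).any (fun term =>
        (ws.map PySem.Str.lower).contains term
          || (["bus", "auto", "car", "transport", "vehicle"] : List String).any
               (fun sub => PySem.Str.isIn sub term))
      = !ws.isEmpty := by
  cases ws with
  | nil => simp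
  | cons h t =>
      simp only [List.isEmpty_cons, List.map_cons, List.any_cons, Bool.not_false]
      simp

-- ===== VERDICT (by name: the statement is the Claim_ definition above) =====
theorem extract_TravelMode_spec : Claim_equal_extract_TravelMode := by
  intro ws _
  show extract_TravelMode ws = extract_TravelMode_alt ws
  simp only [extract_TravelMode, extract_TravelMode_alt, alt_foldl_spec, flight_flip,
    bus_auto_vacuous, Bool.false_or]
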